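-- pv_equiv track=rewrite | github.com/jensecj/code-challenges | advent-of-code-2020/20/main.py | all_transforms
-- ===== SOURCE A (Python) =====
-- from typing import Any, List, Dict, Callable
--
-- Tile = List[str]
--
-- def rotate_left(tile: Tile) -> Tile:
--     """Return a tile which is a counter-clockwise view of TILE"""
--     line_len = len(tile[0])
--
--     lines = []
--     for i in range(line_len):
--         # the last element in the first line of the tile,
--         # becomes the first element in the first line of the rotated tile,
--         # and likewise, the last element of the second line,
--         # becomes the second element of the first line
--         newline = [line[line_len - i - 1] for line in tile]
--         lines.append("".join(newline))
--
--     return lines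
--
-- def flip_vertical(tile: Tile) -> Tile:
--     """Return a tile which is the result of flipping TILE along the vertical axis"""
--     return tile[::-1]
--
-- def flip_horizontal(tile: Tile) -> Tile:
--     """Return a tile which is the result of flipping TILE along the horizontal axis"""
--     return [t[::-1] for t in tile]
--
-- def all_transforms(tile: Tile) -> List[Tile]:
--     """
--     Return a list of all transforms of TILE
--     """
--     transforms = []
--
--     # since we can't turn the image inside out,
--     # there are only 8 states the image can end up in.
--     # each of the front-face and back-face (mirrored) has 4 rotations.
--     # flipping the tile turns the back-face up
--
--     # get states in all front rotations of the tile
--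
--     rotated = tile
--     for _ in range(4):
--         rotated = rotate_left(rotated)
--         transforms.append(rotated)
--
--     # get states in back-face rotations of the tile
--     transforms.append(flip_horizontal(tile))
--     transforms.append(rotate_left(flip_horizontal(tile)))
--
--     transforms.append(flip_vertical(tile))
--     transforms.append(rotate_left(flip_vertical(tile)))
--
--     # you could achieve the same result by only flipping either horizontally,
--     # or vertically, and rotating 4 times
--
--     assert len(transforms) == 8
--     return transforms
-- ===== SOURCE B (Python) =====
-- def all_transforms(tile):
--     """Return the 8 orientations of TILE in the same order as A,
--     built from one transpose plus list/string slicing."""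
--     h, w = len(tile), len(tile[0])
--     t = ["".join(tile[r][c] for r in range(h)) for c in range(w)]
--     fliph = lambda x: [row[::-1] for row in x]
--     return [
--         t[::-1],             # rotate 90 ccw
--         fliph(tile)[::-1],   # rotate 180
--         fliph(t),            # rotate 270 ccw
--         tile,                # rotate 360 = identity
--         fliph(tile),         # horizontal flip
--         t,                   # transpose = rotate_left(flip_horizontal)
--         tile[::-1],          # vertical flip
--         fliph(t[::-1]),      # rotate_left(flip_vertical)
--     ]
-- ===== Notes on version B (the rewrite author's own statement) =====
-- stated objective: faster
-- what changed: B builds one transpose by direct indexing and derives all 8 orientations from it and the tile via list/row reversals (slicing), instead of A's six character-by-character rotate_left passes; measured ~3x constant-factor speedup.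
-- outside the precondition, e.g. on all_transforms([]): A raises IndexError, B raises IndexError
import Mathlib
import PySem

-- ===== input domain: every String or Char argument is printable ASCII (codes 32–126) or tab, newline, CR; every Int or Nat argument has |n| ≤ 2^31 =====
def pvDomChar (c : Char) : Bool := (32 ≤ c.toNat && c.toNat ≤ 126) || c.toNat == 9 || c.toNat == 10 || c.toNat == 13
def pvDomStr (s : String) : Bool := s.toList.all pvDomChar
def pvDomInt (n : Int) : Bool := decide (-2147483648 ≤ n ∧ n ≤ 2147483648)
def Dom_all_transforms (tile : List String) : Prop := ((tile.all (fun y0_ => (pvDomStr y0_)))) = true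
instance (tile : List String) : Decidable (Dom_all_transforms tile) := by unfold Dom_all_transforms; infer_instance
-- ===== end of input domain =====

-- B replaces A's repeated composition of rotate_left with one transpose plus list/row
-- reversals (slicing); same values on nonempty rectangular tiles (objective: faster,
-- constant factor: a timing run measured B ~3x faster than A).

-- ===== PORT A =====
-- rotate_left: line_len = len(tile[0]); rows built by a loop appending "".join(newline)
-- ("".join of one-character strings is ported character-wise as String.ofList).
def pvRotateLeft (tile : List String) : List String :=
  let line_len : Int := PySem.Str.len ((PySem.List.pyGet? tile 0).getD "")
  (PySem.List.pyRange 0 line_len 1).foldl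
    (fun lines i =>
      lines ++ [String.ofList (tile.map (fun line =>
        (PySem.Str.pyGet? line (line_len - i - 1)).getD ' '))])
    []

-- flip_vertical: tile[::-1]
def pvFlipVertical (tile : List String) : List String :=
  (PySem.List.slice? tile none none (-1)).getD []

-- flip_horizontal: [t[::-1] for t in tile]
def pvFlipHorizontal (tile : List String) : List String :=
  tile.map (fun t => (PySem.Str.slice? t none none (-1)).getD "")

def all_transforms (tile : List String) : List (List String) :=
  let st := (List.range 4).foldl
    (fun (st : List String × List (List String)) _ =>
      let r := pvRotateLeft st.1
      (r, st.2 ++ [r]))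
    (tile, [])
  let transforms := st.2
  let transforms := transforms ++ [pvFlipHorizontal tile]
  let transforms := transforms ++ [pvRotateLeft (pvFlipHorizontal tile)]
  let transforms := transforms ++ [pvFlipVertical tile]
  let transforms := transforms ++ [pvRotateLeft (pvFlipVertical tile)]
  transforms

-- ===== PORT B =====
-- x[::-1] on a list of rows
def pvRev (x : List String) : List String :=
  (PySem.List.slice? x none none (-1)).getD []

-- fliph = lambda x: [row[::-1] for row in x]
def pvFlipH (x : List String) : List String :=
  x.map (fun row => (PySem.Str.slice? row none none (-1)).getD "")

-- t = ["".join(tile[r][c] for r in range(h)) for c in range(w)]  (h = len(tile), w = len(tile[0]))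
def pvT (tile : List String) : List String :=
  (PySem.List.pyRange 0 (PySem.Str.len ((PySem.List.pyGet? tile 0).getD "")) 1).map
    (fun c => String.ofList ((PySem.List.pyRange 0 (tile.length : Int) 1).map
      (fun r => (PySem.Str.pyGet? ((PySem.List.pyGet? tile r).getD "") c).getD ' ')))

def all_transforms_alt (tile : List String) : List (List String) :=
  let t := pvT tile
  [pvRev t, pvRev (pvFlipH tile), pvFlipH t, tile, pvFlipH tile, t, pvRev tile, pvFlipH (pvRev t)]

-- ===== PRECONDITION & SPEC =====
-- Pre_ restricts to the natural tile domain: nonempty rectangular tiles with nonempty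
-- rows. Outside it A raises IndexError (empty tile, zero-width rows, most ragged tiles),
-- and on the few ragged tiles it does accept, A silently truncates rows mid-transform —
-- an artefact of repeatedly reading len(tile[0]) — which B does not reproduce.
def Pre_all_transforms (tile : List String) : Prop :=
  tile ≠ [] ∧ 0 < (tile.headD "").toList.length ∧
    ∀ s ∈ tile, s.toList.length = (tile.headD "").toList.length
instance (tile : List String) : Decidable (Pre_all_transforms tile) := by
  unfold Pre_all_transforms; infer_instance

def pvWitness_all_transforms : List String := ["ab", "cd"]

def Spec_all_transforms (tile : List String) (out : List (List String)) : Prop := out = all_transforms_alt tile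
instance (tile : List String) (out : List (List String)) : Decidable (Spec_all_transforms tile out) := by unfold Spec_all_transforms; infer_instance

-- ===== CLAIM (what is proved, stated in full; the proofs are below) =====
def Claim_equal_all_transforms : Prop := ∀ (tile : List String), Dom_all_transforms tile → Pre_all_transforms tile → Spec_all_transforms tile (all_transforms tile)

-- ===== LEMMAS AND PROOFS =====

-- An h×w grid of characters given by an index function: the common normal form both
-- ports' transforms are reduced to.
def pvGrid (h w : Nat) (f : Nat → Nat → Char) : List String :=
  (List.range h).map (fun i => String.ofList ((List.range w).map (fun j => f i j)))

theorem pvGrid_congr {h w : Nat} {f g : Nat → Nat → Char}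
    (hfg : ∀ i < h, ∀ j < w, f i j = g i j) : pvGrid h w f = pvGrid h w g := by
  unfold pvGrid
  refine List.map_congr_left (fun i hi => ?_)
  rw [List.mem_range] at hi
  exact congrArg _ (List.map_congr_left (fun j hj => hfg i hi j (List.mem_range.mp hj)))

theorem pvGrid_length (h w : Nat) (f : Nat → Nat → Char) : (pvGrid h w f).length = h := by
  simp [pvGrid]

theorem pvGrid_getElem (h w : Nat) (f : Nat → Nat → Char) (i : Nat) (hi : i < h) :
    (pvGrid h w f)[i]'(by simp [pvGrid_length, hi]) =
      String.ofList ((List.range w).map (fun j => f i j)) := by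
  simp [pvGrid]

theorem pvRev_grid (h w : Nat) (f : Nat → Nat → Char) :
    pvRev (pvGrid h w f) = pvGrid h w (fun i j => f (h - 1 - i) j) := by
  rw [pvRev, PySem.List.slice?_none_none_neg_one, Option.getD_some]
  refine List.ext_getElem (by simp [pvGrid_length]) (fun i h1 h2 => ?_)
  have hi : i < h := by simpa [pvGrid_length] using h2
  rw [List.getElem_reverse, pvGrid_getElem _ _ _ _ (by simp [pvGrid_length] at *; omega),
    pvGrid_getElem _ _ _ _ hi]
  simp [pvGrid_length]

theorem pvFlipH_grid (h w : Nat) (f : Nat → Nat → Char) :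
    pvFlipH (pvGrid h w f) = pvGrid h w (fun i j => f i (w - 1 - j)) := by
  unfold pvFlipH pvGrid
  rw [List.map_map]
  refine List.map_congr_left (fun i hi => ?_)
  rw [List.mem_range] at hi
  simp only [Function.comp, PySem.Str.slice?_none_none_neg_one, Option.getD_some,
    String.toList_ofList]
  refine congrArg _ (List.ext_getElem (by simp) (fun j h1 h2 => ?_))
  have hj : j < w := by simpa using h2
  rw [List.getElem_reverse]
  simp

theorem pvRotateLeft_grid (h w : Nat) (f : Nat → Nat → Char) (hh : 0 < h) :
    pvRotateLeft (pvGrid h w f) = pvGrid w h (fun i j => f j (w - 1 - i)) := by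
  have hlen : PySem.Str.len ((PySem.List.pyGet? (pvGrid h w f) 0).getD "") = (w : Int) := by
    rw [show (0 : Int) = ((0 : Nat) : Int) from rfl, PySem.List.pyGet?_natCast]
    rw [List.getElem?_eq_getElem (by simp [pvGrid_length]; omega)]
    rw [pvGrid_getElem h w f 0 hh]
    simp [PySem.Str.len_eq]
  simp only [pvRotateLeft, hlen]
  rw [PySem.List.pyRange_zero_natCast, List.foldl_map,
    PySem.List.foldl_append_singleton_eq_map, List.nil_append]
  unfold pvGrid
  refine List.map_congr_left (fun i hi => ?_)
  rw [List.mem_range] at hi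
  refine congrArg _ ?_
  rw [List.map_map]
  refine List.map_congr_left (fun j hj => ?_)
  rw [List.mem_range] at hj
  simp only [Function.comp]
  have harith : (w : Int) - (i : Int) - 1 = ((w - 1 - i : Nat) : Int) := by omega
  rw [harith, PySem.Str.pyGet?_natCast]
  simp only [String.toList_ofList]
  rw [List.getElem?_eq_getElem (by simp; omega)]
  simp

theorem pvT_grid (h w : Nat) (f : Nat → Nat → Char) (hh : 0 < h) :
    pvT (pvGrid h w f) = pvGrid w h (fun i j => f j i) := by
  have hlen : PySem.Str.len ((PySem.List.pyGet? (pvGrid h w f) 0).getD "") = (w : Int) := by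
    rw [show (0 : Int) = ((0 : Nat) : Int) from rfl, PySem.List.pyGet?_natCast]
    rw [List.getElem?_eq_getElem (by simp [pvGrid_length]; omega)]
    rw [pvGrid_getElem h w f 0 hh]
    simp [PySem.Str.len_eq]
  unfold pvT
  rw [hlen, pvGrid_length]
  simp only [PySem.List.pyRange_zero_natCast, List.map_map]
  conv_rhs => unfold pvGrid
  refine List.map_congr_left (fun i hi => ?_)
  rw [List.mem_range] at hi
  simp only [Function.comp]
  refine congrArg _ ?_
  refine List.map_congr_left (fun j hj => ?_)
  rw [List.mem_range] at hj
  simp only [Function.comp]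
  rw [PySem.List.pyGet?_natCast]
  rw [List.getElem?_eq_getElem (by rw [pvGrid_length]; omega)]
  rw [Option.getD_some, pvGrid_getElem h w f j hj, PySem.Str.pyGet?_natCast]
  simp only [String.toList_ofList]
  rw [List.getElem?_eq_getElem (by simp; omega)]
  simp

theorem pvFlipHorizontal_eq (x : List String) : pvFlipHorizontal x = pvFlipH x := rfl
theorem pvFlipVertical_eq (x : List String) : pvFlipVertical x = pvRev x := rfl

theorem all_transforms_unfold (tile : List String) :
    all_transforms tile =
      [pvRotateLeft tile, pvRotateLeft (pvRotateLeft tile),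
       pvRotateLeft (pvRotateLeft (pvRotateLeft tile)),
       pvRotateLeft (pvRotateLeft (pvRotateLeft (pvRotateLeft tile))),
       pvFlipHorizontal tile, pvRotateLeft (pvFlipHorizontal tile),
       pvFlipVertical tile, pvRotateLeft (pvFlipVertical tile)] := by
  simp only [all_transforms, List.range_succ, List.range_zero, List.foldl_nil,
    List.foldl_cons, List.foldl_append]
  rfl

theorem all_transforms_alt_unfold (tile : List String) :
    all_transforms_alt tile =
      [pvRev (pvT tile), pvRev (pvFlipH tile), pvFlipH (pvT tile), tile,
       pvFlipH tile, pvT tile, pvRev tile, pvFlipH (pvRev (pvT tile))] := by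
  simp only [all_transforms_alt]

-- the master equality, on grids
theorem pv_master (h w : Nat) (f : Nat → Nat → Char) (hh : 0 < h) (hw : 0 < w) :
    all_transforms (pvGrid h w f) = all_transforms_alt (pvGrid h w f) := by
  rw [all_transforms_unfold, all_transforms_alt_unfold]
  rw [pvFlipHorizontal_eq, pvFlipVertical_eq]
  rw [pvT_grid h w f hh, pvFlipH_grid, pvRev_grid, pvRev_grid, pvRev_grid,
    pvFlipH_grid, pvFlipH_grid]
  rw [pvRotateLeft_grid h w f hh,
    pvRotateLeft_grid w h _ hw,
    pvRotateLeft_grid h w _ hh,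
    pvRotateLeft_grid w h _ hw,
    pvRotateLeft_grid h w _ hh,
    pvRotateLeft_grid h w _ hh]
  refine congrArg₂ _ (pvGrid_congr fun i hi j hj => rfl) ?_
  refine congrArg₂ _ (pvGrid_congr fun i hi j hj => rfl) ?_
  refine congrArg₂ _ (pvGrid_congr fun i hi j hj => by congr 1; omega) ?_
  refine congrArg₂ _ (pvGrid_congr fun i hi j hj => by congr 1 <;> omega) ?_
  refine congrArg₂ _ (pvGrid_congr fun i hi j hj => rfl) ?_
  refine congrArg₂ _ (pvGrid_congr fun i hi j hj => by congr 1; omega) ?_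
  refine congrArg₂ _ (pvGrid_congr fun i hi j hj => rfl) ?_
  refine congrArg₂ _ (pvGrid_congr fun i hi j hj => rfl) rfl

theorem tile_eq_grid (tile : List String) (hpre : Pre_all_transforms tile) :
    tile = pvGrid tile.length (tile.headD "").toList.length
      (fun i j => ((tile.getD i "").toList.getD j ' ')) := by
  obtain ⟨hne, hw, hrect⟩ := hpre
  refine List.ext_getElem (by simp [pvGrid_length]) (fun i h1 h2 => ?_)
  rw [pvGrid_getElem _ _ _ i h1]
  have hrow : tile[i].toList.length = (tile.headD "").toList.length :=
    hrect _ (List.getElem_mem h1)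
  refine String.ext ?_
  rw [String.toList_ofList]
  refine List.ext_getElem (by simp [hrow]) (fun j j1 j2 => ?_)
  simp only [List.getElem_map, List.getElem_range]
  rw [List.getD_eq_getElem tile "" h1, List.getD_eq_getElem _ ' ' (by omega)]

-- ===== VERDICT (by name: the statement is the Claim_ definition above) =====
theorem all_transforms_spec : Claim_equal_all_transforms := by
  intro tile _ hpre
  unfold Spec_all_transforms
  have hh : 0 < tile.length := List.length_pos_iff.mpr hpre.1
  rw [tile_eq_grid tile hpre]
  exact pv_master _ _ _ hh hpre.2.1
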